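-- pv_equiv track=rewrite | github.com/jang010505/Problem-Solving-Study | programmers/level4/60060.py | solution
-- ===== SOURCE A (Python) =====
-- def add(head, word, l):
--     node = head
--     for w in word:
--         if w not in node:
--             node[w] = {}
--         node = node[w]
--         if 'len' not in node:
--             node['len'] = [l]
--         else:
--             node['len'].append(l)
--     node['end'] = True
--
-- def search(head, querie, l):
--     count = 0
--     node = head
--     for q in querie:
--         if q == '?':
--             return node['len'].count(l)
--         elif q not in node:
--             break
--         node = node[q]
--     return count
--
-- def solution(words, queries):
--     head, head_rev = {}, {}
--     wc = []
--
--     for word in words: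
--         l = len(word)
--         add(head, word, l)
--         add(head_rev, word[::-1], l)
--         wc.append(l)
--
--     answer = []
--
--     for querie in queries:
--         l = len(querie)
--         if querie[0] == '?':
--             if querie[-1] == '?':
--                 answer.append(wc.count(l))
--             else:
--                 answer.append(search(head_rev, querie[::-1], l))
--         else:
--             answer.append(search(head, querie, l))
--
--     return answer
-- ===== SOURCE B (Python) =====
-- def solution(words, queries):
--     by_len = {}
--     for w in words:
--         by_len[len(w)] = by_len.get(len(w), 0) + 1
--     pre_cnt = {}
--     for w in words:
--         for i in range(1, len(w) + 1):
--             k = (w[:i], len(w))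
--             pre_cnt[k] = pre_cnt.get(k, 0) + 1
--     suf_cnt = {}
--     for w in words:
--         rw = w[::-1]
--         for i in range(1, len(w) + 1):
--             k = (rw[:i], len(w))
--             suf_cnt[k] = suf_cnt.get(k, 0) + 1
--     answer = []
--     for q in queries:
--         if '?' not in q:
--             answer.append(0)
--             continue
--         l = len(q)
--         if q[0] == '?' and q[-1] == '?':
--             answer.append(by_len.get(l, 0))
--         elif q[0] == '?':
--             rq = q[::-1]
--             answer.append(suf_cnt.get((rq[:rq.index('?')], l), 0))
--         else:
--             answer.append(pre_cnt.get((q[:q.index('?')], l), 0))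
--     return answer
-- ===== Notes on version B (the rewrite author's own statement) =====
-- stated objective: alternative
-- what changed: Replaces the two character-trie structures (per-character dict walk plus a per-node length-list scan at query time) by three flat hash tables precomputed up front - word-length counts and (prefix,length)/(reversed-prefix-of-reversed-word,length) occurrence counters - so each query becomes a single dict lookup; it trades the trie build for an affix-enumeration build of similar overall cost.
import Mathlib
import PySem

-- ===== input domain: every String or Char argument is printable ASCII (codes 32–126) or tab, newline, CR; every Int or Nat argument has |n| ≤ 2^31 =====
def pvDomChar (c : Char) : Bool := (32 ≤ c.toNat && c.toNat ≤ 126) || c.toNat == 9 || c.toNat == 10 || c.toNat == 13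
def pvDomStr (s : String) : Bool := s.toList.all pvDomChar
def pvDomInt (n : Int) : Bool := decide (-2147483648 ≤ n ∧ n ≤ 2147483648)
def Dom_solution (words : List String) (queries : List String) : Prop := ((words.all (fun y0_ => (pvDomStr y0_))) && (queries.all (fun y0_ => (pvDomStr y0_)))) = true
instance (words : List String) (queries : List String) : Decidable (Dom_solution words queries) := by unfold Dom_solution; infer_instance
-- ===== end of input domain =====

-- ===== PORT A =====
-- B replaces A's two char-tries by flat affix-count dictionaries: one dict lookup per query (alternative algorithm, similar overall cost).
-- NOTE: Pre_solution excludes inputs where A raises; equivalence is about return values (A mutates nothing).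

-- A's trie node: a dict mapping chars to child nodes plus the special keys 'len' (list) and 'end' (bool).
-- (mutual pair instead of a nested inductive; insertion order of child keys kept, as in the Python dict)
mutual
inductive PyTrie where
  | mk : List Int → Bool → PyChildren → PyTrie
inductive PyChildren where
  | nil : PyChildren
  | cons : Char → PyTrie → PyChildren → PyChildren
end

-- 'w in node' / 'node[w]' on the char keys
def pyChildGet : PyChildren → Char → Option PyTrie
  | PyChildren.nil, _ => none
  | PyChildren.cons c' t rest, c => if c' = c then some t else pyChildGet rest c

-- 'node[w] = t' (overwrite keeps position, new key appends — dict insertion order)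
def pyChildSet : PyChildren → Char → PyTrie → PyChildren
  | PyChildren.nil, c, t => PyChildren.cons c t PyChildren.nil
  | PyChildren.cons c' t' rest, c, t =>
      if c' = c then PyChildren.cons c' t rest else PyChildren.cons c' t' (pyChildSet rest c t)

-- add(head, word, l): walk/create child for each char, appending l to each visited child's 'len';
-- at the end set 'end' = True.  (functional rendering of the in-place mutation)
def pyAdd : PyTrie → List Char → Int → PyTrie
  | PyTrie.mk lens e ch, [], _l => PyTrie.mk lens true ch
  | PyTrie.mk lens e ch, c :: cs, l =>
      let child := (pyChildGet ch c).getD (PyTrie.mk [] false PyChildren.nil)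
      let child := match child with
        | PyTrie.mk ls e' ch' => PyTrie.mk (ls ++ [l]) e' ch'   -- node['len'].append(l) / = [l]
      PyTrie.mk lens e (pyChildSet ch c (pyAdd child cs l))

-- search(head, querie, l)
def pySearch : PyTrie → List Char → Int → Int
  | _, [], _ => 0
  | PyTrie.mk lens _ ch, c :: cs, l =>
      if c = '?' then (PySem.List.count lens l : Int)
      else match pyChildGet ch c with
        | none => 0
        | some t => pySearch t cs l

def solution (words : List String) (queries : List String) : List Int :=
  let st := words.foldl
    (fun (st : PyTrie × PyTrie × List Int) word =>
      let l : Int := PySem.Str.len word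
      (pyAdd st.1 word.toList l,
       pyAdd st.2.1 (((PySem.Str.slice? word none none (-1)).getD "").toList) l,   -- word[::-1]
       st.2.2 ++ [l]))
    (PyTrie.mk [] false PyChildren.nil, PyTrie.mk [] false PyChildren.nil, [])
  queries.foldl
    (fun answer q =>
      let l : Int := PySem.Str.len q
      answer ++ [match PySem.Str.pyGet? q 0 with
        | none => 0   -- querie[0] raises IndexError: excluded by Pre_solution
        | some c0 =>
          if c0 = '?' then
            match PySem.Str.pyGet? q (-1) with
            | none => 0
            | some cl =>
              if cl = '?' then (PySem.List.count st.2.2 l : Int)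
              else pySearch st.2.1 (((PySem.Str.slice? q none none (-1)).getD "").toList) l
          else pySearch st.1 q.toList l])
    []

-- ===== PORT B =====
-- Source B: three flat counting dicts built with d[k] = d.get(k, 0) + 1
def solution_alt (words : List String) (queries : List String) : List Int :=
  let byLen : PySem.Dict Int Int :=
    words.foldl (fun d w =>
      d.insert (PySem.Str.len w) (d.getD (PySem.Str.len w) 0 + 1)) PySem.Dict.empty
  let preCnt : PySem.Dict (String × Int) Int :=
    words.foldl (fun d w =>
      (PySem.List.pyRange 1 (PySem.Str.len w + 1) 1).foldl (fun d i =>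
        let k := (PySem.Str.slice w none (some i), PySem.Str.len w)    -- (w[:i], len(w))
        d.insert k (d.getD k 0 + 1)) d) PySem.Dict.empty
  let sufCnt : PySem.Dict (String × Int) Int :=
    words.foldl (fun d w =>
      let rw := (PySem.Str.slice? w none none (-1)).getD ""            -- w[::-1]
      (PySem.List.pyRange 1 (PySem.Str.len w + 1) 1).foldl (fun d i =>
        let k := (PySem.Str.slice rw none (some i), PySem.Str.len w)   -- (rw[:i], len(w))
        d.insert k (d.getD k 0 + 1)) d) PySem.Dict.empty
  queries.foldl (fun answer q =>
    if PySem.Str.isIn "?" q = false then answer ++ [0]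
    else
      let l : Int := PySem.Str.len q
      if PySem.Str.pyGet? q 0 = some '?' then
        if PySem.Str.pyGet? q (-1) = some '?' then
          answer ++ [byLen.getD l 0]
        else
          let rq := (PySem.Str.slice? q none none (-1)).getD ""        -- q[::-1]
          -- rq[:rq.index('?')] : '?' ∈ rq holds on this branch, so index = find
          answer ++ [sufCnt.getD (PySem.Str.slice rq none (some (PySem.Str.find rq "?")), l) 0]
      else
        answer ++ [preCnt.getD (PySem.Str.slice q none (some (PySem.Str.find q "?")), l) 0])
    []

-- ===== PRECONDITION & SPEC =====
-- Pre_solution excludes exactly the inputs on which A raises: an empty query string makes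
-- A's querie[0] raise IndexError (B returns 0 for such a query).
def Pre_solution (words : List String) (queries : List String) : Prop := "" ∉ queries
instance (words : List String) (queries : List String) : Decidable (Pre_solution words queries) := by
  unfold Pre_solution; infer_instance
def pvWitness_solution : List String × List String := (["frodo", "front", "frost", "frame", "kakao"], ["fro??", "????o", "fr???", "abcd?", "?????"])


def Spec_solution (words : List String) (queries : List String) (out : List Int) : Prop := out = solution_alt words queries
instance (words : List String) (queries : List String) (out : List Int) : Decidable (Spec_solution words queries out) := by unfold Spec_solution; infer_instance

-- ===== CLAIM (what is proved, stated in full; the proofs are below) =====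
def Claim_equal_solution : Prop := ∀ (words : List String) (queries : List String), Dom_solution words queries → Pre_solution words queries → Spec_solution words queries (solution words queries)

-- ===== LEMMAS AND PROOFS =====

-- ---- A-side: characterising the trie ----

-- lens list found by descending from t along path p ([] when the path does not exist)
def getLens : PyTrie → List Char → List Int
  | PyTrie.mk lens _ _, [] => lens
  | PyTrie.mk _ _ ch, c :: p =>
      match pyChildGet ch c with
      | none => []
      | some t => getLens t p

theorem pyChildGet_pyChildSet (a c : Char) (t : PyTrie) :
    ∀ (ch : PyChildren), pyChildGet (pyChildSet ch a t) c = if c = a then some t else pyChildGet ch c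
  | PyChildren.nil => by
      by_cases h : c = a
      · subst h; simp [pyChildSet, pyChildGet]
      · simp [pyChildSet, pyChildGet, h, Ne.symm h]
  | PyChildren.cons c' t' rest => by
      have ih := pyChildGet_pyChildSet a c t rest
      by_cases h1 : c' = a
      · subst h1
        by_cases h2 : c = c'
        · subst h2; simp [pyChildSet, pyChildGet]
        · simp [pyChildSet, pyChildGet, h2, Ne.symm h2]
      · by_cases h2 : c' = c
        · subst h2
          simp [pyChildSet, pyChildGet, h1]
        · simp [pyChildSet, pyChildGet, h1, h2, ih]

theorem getLens_root_pyAdd (t : PyTrie) (w : List Char) (l : Int) :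
    getLens (pyAdd t w l) [] = getLens t [] := by
  cases t with
  | mk lens e ch => cases w <;> simp [pyAdd, getLens]

theorem getLens_mk_cons (lens lens' : List Int) (e e' : Bool) (ch : PyChildren)
    (c : Char) (p : List Char) :
    getLens (PyTrie.mk lens e ch) (c :: p) = getLens (PyTrie.mk lens' e' ch) (c :: p) := rfl

theorem getLens_pyAdd (w : List Char) (t : PyTrie) (l : Int) (c : Char) (p : List Char) :
    getLens (pyAdd t w l) (c :: p) =
      if (c :: p) <+: w then getLens t (c :: p) ++ [l] else getLens t (c :: p) := by
  induction w generalizing t c p with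
  | nil =>
      cases t with
      | mk lens e ch => simp [pyAdd, getLens]
  | cons a as ih =>
      cases t with
      | mk lens e ch =>
        by_cases hca : c = a
        · subst hca
          cases hg : pyChildGet ch c with
          | none =>
              simp only [pyAdd, hg, Option.getD_none, getLens, pyChildGet_pyChildSet,
                if_true, List.cons_prefix_cons, true_and, List.nil_append]
              cases p with
              | nil =>
                  rw [getLens_root_pyAdd]
                  simp [getLens, List.nil_prefix]
              | cons d p' =>
                  rw [ih]
                  simp [getLens, pyChildGet]
          | some u =>
              cases u with
              | mk uls ue uch =>
                simp only [pyAdd, hg, Option.getD_some, getLens, pyChildGet_pyChildSet,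
                  if_true, List.cons_prefix_cons, true_and]
                cases p with
                | nil =>
                    rw [getLens_root_pyAdd]
                    simp [getLens, List.nil_prefix]
                | cons d p' =>
                    rw [ih]
                    rw [getLens_mk_cons (uls ++ [l]) uls ue ue uch]
        · have : ¬ (c :: p) <+: (a :: as) := by
            intro hpre; exact hca (List.cons_prefix_cons.mp hpre).1
          simp [pyAdd, getLens, pyChildGet_pyChildSet, hca, this]

theorem pySearch_eq (cs : List Char) (t : PyTrie) (l : Int) :
    pySearch t cs l =
      if '?' ∈ cs then (PySem.List.count (getLens t (cs.takeWhile (· ≠ '?'))) l : Int) else 0 := by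
  induction cs generalizing t with
  | nil => simp [pySearch]
  | cons c cs ih =>
      cases t with
      | mk lens e ch =>
        by_cases hc : c = '?'
        · subst hc; simp [pySearch, getLens]
        · rw [List.takeWhile_cons_of_pos (by simpa using hc)]
          simp only [pySearch, if_neg hc, List.mem_cons]
          have hne : ¬ ('?' = c ∨ '?' ∈ cs) ↔ ¬ '?' ∈ cs := by
            constructor
            · intro h h2; exact h (Or.inr h2)
            · intro h h2; rcases h2 with h2 | h2
              · exact hc h2.symm
              · exact h h2
          cases hg : pyChildGet ch c with
          | none =>
              have : getLens (PyTrie.mk lens e ch) (c :: cs.takeWhile (· ≠ '?')) = [] := by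
                simp [getLens, hg]
              rw [this]
              simp [PySem.List.count_eq]
          | some u =>
              show pySearch u cs l = _
              rw [ih]
              have : getLens (PyTrie.mk lens e ch) (c :: cs.takeWhile (· ≠ '?')) =
                  getLens u (cs.takeWhile (· ≠ '?')) := by simp [getLens, hg]
              rw [this]
              by_cases hm : '?' ∈ cs
              · simp [hm]
              · simp only [hm, or_false, if_neg (fun h : '?' = c => hc h.symm)]
                simp

theorem getLens_foldl (key : String → List Char) (ws : List String) (t : PyTrie)
    (c : Char) (p : List Char) :
    getLens (ws.foldl (fun t w => pyAdd t (key w) (PySem.Str.len w)) t) (c :: p) =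
      getLens t (c :: p) ++
        (ws.filter (fun w => decide ((c :: p) <+: key w))).map (fun w => PySem.Str.len w) := by
  induction ws generalizing t with
  | nil => simp
  | cons w ws ih =>
      simp only [List.foldl_cons, ih, List.filter_cons]
      by_cases h : (c :: p) <+: key w
      · simp [getLens_pyAdd, h]
      · simp [getLens_pyAdd, h]

-- generic loop shapes
theorem foldl_prod3 {α β γ σ : Type} (f : α → σ → α) (g : β → σ → β) (h : γ → σ → γ)
    (l : List σ) (a : α) (b : β) (c : γ) :
    l.foldl (fun st x => (f st.1 x, g st.2.1 x, h st.2.2 x)) (a, b, c) =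
      (l.foldl f a, l.foldl g b, l.foldl h c) := by
  induction l generalizing a b c with
  | nil => rfl
  | cons x xs ih => simp [ih]

theorem foldl_foldl_flatMap {α κ δ : Type} (l : List α) (g : α → List κ) (F : δ → κ → δ)
    (d : δ) : l.foldl (fun d x => (g x).foldl F d) d = (l.flatMap g).foldl F d := by
  induction l generalizing d with
  | nil => rfl
  | cons x xs ih => simp [ih, List.foldl_append]

theorem sum_map_ite_one_zero_nat {α : Type} (l : List α) (c : α → Prop) [DecidablePred c] :
    (l.map (fun x => if c x then 1 else 0)).sum = l.countP (fun x => decide (c x)) := by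
  induction l with
  | nil => rfl
  | cons x xs ih => by_cases h : c x <;> simp [h, ih, Nat.add_comm]

-- takeWhile = take-to-first-'?' (via find)
theorem takeWhile_eq_take_of (cs : List Char) (k : Nat) (hk : k ≤ cs.length)
    (hlt : ∀ i (h : i < k), cs[i]'(by omega) ≠ '?') (hq : cs[k]? = some '?') :
    cs.takeWhile (· ≠ '?') = cs.take k := by
  induction cs generalizing k with
  | nil => simp at hq
  | cons c cs ih =>
      cases k with
      | zero =>
          simp only [List.getElem?_cons_zero, Option.some.injEq] at hq
          simp [hq]
      | succ k =>
          have hc : c ≠ '?' := hlt 0 (by omega)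
          rw [List.takeWhile_cons_of_pos (by simpa using hc), List.take_succ_cons]
          rw [ih k (by simpa using hk) (fun i h => by simpa using hlt (i+1) (by omega)) (by simpa using hq)]

theorem takeWhile_eq_take_find (cs : List Char) (h : '?' ∈ cs) :
    cs.takeWhile (· ≠ '?') = cs.take (PySem.Chars.find cs ['?']).toNat := by
  have hinf : ['?'] <:+: cs := (List.singleton_infix_iff _ _).mpr h
  have hnn : 0 ≤ PySem.Chars.find cs ['?'] := (PySem.Chars.find_nonneg_iff cs ['?']).mpr hinf
  obtain ⟨hpre, hmin⟩ := PySem.Chars.find_spec hnn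
  have hle : (PySem.Chars.find cs ['?']).toNat ≤ cs.length := by
    have := PySem.Chars.find_le_length cs ['?']; omega
  have hq : cs[(PySem.Chars.find cs ['?']).toNat]? = some '?' := by
    obtain ⟨tl, htl⟩ := hpre
    have h0 : (cs.drop (PySem.Chars.find cs ['?']).toNat)[0]? = some '?' := by
      rw [← htl]; rfl
    simpa [List.getElem?_drop] using h0
  have hklen : (PySem.Chars.find cs ['?']).toNat < cs.length := by
    by_contra hcon
    rw [List.getElem?_eq_none_iff.mpr (by omega)] at hq
    simp at hq
  apply takeWhile_eq_take_of cs _ hle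
  · intro i hi hqi
    refine hmin i hi ?_
    have : cs.drop i = '?' :: cs.drop (i + 1) := by
      rw [List.drop_eq_getElem_cons (by omega)]
      simp [hqi]
    rw [this]
    exact ⟨_, rfl⟩
  · exact hq

-- ---- B-side: characterising the counting dicts ----

theorem byLen_getD (words : List String) (l0 : Int) :
    (words.foldl (fun d w =>
        d.insert (PySem.Str.len w) (d.getD (PySem.Str.len w) 0 + 1)) PySem.Dict.empty).getD l0 0 =
      (List.count l0 (words.map PySem.Str.len) : Int) := by
  rw [← List.foldl_map (f := PySem.Str.len)
        (g := fun d x => PySem.Dict.insert d x (d.getD x 0 + 1))]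
  rw [PySem.Dict.getD_foldl_insert_add_one]
  simp

theorem toList_slice_to (s : String) (b : Int) (hb : 0 ≤ b) :
    (PySem.Str.slice s none (some b)).toList = s.toList.take b.toNat := by
  simp [pysem, PySem.List.slice_to _ hb]

theorem count_affix (s : String) (n : Int) (hn : n = (s.toList.length : Int))
    (P0 : String) (l0 : Int) :
    List.count (P0, l0) ((PySem.List.pyRange 1 (n + 1) 1).map
        (fun i => (PySem.Str.slice s none (some i), n))) =
      if P0.toList <+: s.toList ∧ P0.toList ≠ [] ∧ l0 = n then 1 else 0 := by
  rw [List.count_eq_countP, List.countP_map]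
  by_cases hC : P0.toList <+: s.toList ∧ P0.toList ≠ [] ∧ l0 = n
  · obtain ⟨hpre, hne, hl0⟩ := hC
    rw [if_pos ⟨hpre, hne, hl0⟩]
    have hlen : P0.toList.length ≤ s.toList.length := hpre.length_le
    have hcongr : List.countP ((fun x => x == (P0, l0)) ∘ fun i => (PySem.Str.slice s none (some i), n))
        (PySem.List.pyRange 1 (n + 1) 1) =
        List.countP (fun i => i == (P0.toList.length : Int)) (PySem.List.pyRange 1 (n + 1) 1) := by
      apply List.countP_congr
      intro i hi
      rw [PySem.List.mem_pyRange_one] at hi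
      simp only [Function.comp_apply, beq_iff_eq, Prod.mk.injEq]
      constructor
      · rintro ⟨hs, -⟩
        have := congrArg String.toList hs
        rw [toList_slice_to s i (by omega)] at this
        have hlen2 := congrArg List.length this
        rw [List.length_take] at hlen2
        omega
      · intro hi2
        refine ⟨?_, hl0.symm⟩
        apply String.toList_inj.mp
        rw [toList_slice_to s i (by omega), hi2]
        simp only [Int.toNat_natCast]
        exact (List.prefix_iff_eq_take.mp hpre).symm
    rw [hcongr, ← List.count_eq_countP, List.count_eq_one_of_mem (PySem.List.nodup_pyRange_one _ _)]
    rw [PySem.List.mem_pyRange_one]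
    constructor
    · have : P0.toList.length ≠ 0 := by
        intro h0; exact hne (List.eq_nil_of_length_eq_zero h0)
      omega
    · omega
  · rw [if_neg hC, List.countP_eq_zero]
    intro i hi
    rw [PySem.List.mem_pyRange_one] at hi
    simp only [Function.comp_apply, beq_iff_eq, Prod.mk.injEq, not_and]
    intro hs hl0
    apply hC
    have := congrArg String.toList hs
    rw [toList_slice_to s i (by omega)] at this
    refine ⟨?_, ?_, hl0.symm⟩
    · rw [← this]; exact List.take_prefix _ _
    · rw [← this]
      intro hnil
      have := congrArg List.length hnil
      rw [List.length_take] at this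
      simp only [List.length_nil] at this
      omega

theorem affixCnt_getD (key : String → String)
    (hkey : ∀ w, PySem.Str.len w = ((key w).toList.length : Int))
    (words : List String) (P0 : String) (l0 : Int) :
    (words.foldl (fun d w =>
        (PySem.List.pyRange 1 (PySem.Str.len w + 1) 1).foldl (fun d i =>
          d.insert (PySem.Str.slice (key w) none (some i), PySem.Str.len w)
            (d.getD (PySem.Str.slice (key w) none (some i), PySem.Str.len w) 0 + 1)) d)
      PySem.Dict.empty).getD (P0, l0) 0 =
    (words.countP (fun w =>
        decide (P0.toList <+: (key w).toList ∧ P0.toList ≠ [] ∧ l0 = PySem.Str.len w)) : Int) := by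
  have hinner : ∀ (d : PySem.Dict (String × Int) Int) (w : String),
      (PySem.List.pyRange 1 (PySem.Str.len w + 1) 1).foldl (fun d i =>
          d.insert (PySem.Str.slice (key w) none (some i), PySem.Str.len w)
            (d.getD (PySem.Str.slice (key w) none (some i), PySem.Str.len w) 0 + 1)) d =
      ((PySem.List.pyRange 1 (PySem.Str.len w + 1) 1).map
          (fun i => (PySem.Str.slice (key w) none (some i), PySem.Str.len w))).foldl
        (fun d k => d.insert k (d.getD k 0 + 1)) d := by
    intro d w
    rw [List.foldl_map]
  simp only [hinner]
  rw [foldl_foldl_flatMap]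
  rw [PySem.Dict.getD_foldl_insert_add_one]
  rw [List.count_flatMap]
  simp only [PySem.Dict.getD_empty, zero_add, Function.comp_def]
  have hper : ∀ w : String,
      List.count (P0, l0) ((PySem.List.pyRange 1 (PySem.Str.len w + 1) 1).map
          (fun i => (PySem.Str.slice (key w) none (some i), PySem.Str.len w))) =
      if P0.toList <+: (key w).toList ∧ P0.toList ≠ [] ∧ l0 = PySem.Str.len w then 1 else 0 := by
    intro w
    rw [show PySem.Str.len w = ((key w).toList.length : Int) from hkey w]
    exact count_affix (key w) _ rfl P0 l0
  simp only [hper]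
  rw [sum_map_ite_one_zero_nat]

-- ---- assembling the two programs ----

theorem foldl_body_append {α β : Type} (body : List β → α → List β) (f : α → β)
    (h : ∀ acc x, body acc x = acc ++ [f x]) (l : List α) (acc : List β) :
    l.foldl body acc = acc ++ l.map f := by
  induction l generalizing acc with
  | nil => simp
  | cons x xs ih => rw [List.foldl_cons, h, ih, List.map_cons]; simp

theorem countA_eq (words : List String) (keyL : String → List Char) (tw : List Char) (l : Int) :
    (PySem.List.count ((words.filter (fun w => decide (tw <+: keyL w))).map
        (fun w => PySem.Str.len w)) l : Int) =
    (words.countP (fun w => (PySem.Str.len w == l) && decide (tw <+: keyL w)) : Int) := by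
  rw [PySem.List.count_eq, List.count_eq_countP, List.countP_map, List.countP_filter]
  rfl

theorem countP_bridge (words : List String) (keyL : String → List Char) (tw : List Char)
    (l : Int) (htw : tw ≠ []) :
    (words.countP (fun w => (PySem.Str.len w == l) && decide (tw <+: keyL w)) : Nat) =
    words.countP (fun w => decide (tw <+: keyL w ∧ tw ≠ [] ∧ l = PySem.Str.len w)) := by
  apply List.countP_congr
  intro w _
  simp only [Bool.and_eq_true, beq_iff_eq, decide_eq_true_eq]
  constructor
  · rintro ⟨h1, h2⟩; exact ⟨h2, htw, h1.symm⟩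
  · rintro ⟨h1, -, h3⟩; exact ⟨h3.symm, h1⟩

theorem perQuery (words : List String) (q : String) (hq : q ≠ "") :
    (match PySem.Str.pyGet? q 0 with
      | none => (0 : Int)
      | some c0 =>
        if c0 = '?' then
          match PySem.Str.pyGet? q (-1) with
          | none => (0 : Int)
          | some cl =>
            if cl = '?' then (PySem.List.count (List.map (fun w => PySem.Str.len w) words) (PySem.Str.len q) : Int)
            else
              pySearch
                (List.foldl
                  (fun t word => pyAdd t ((PySem.Str.slice? word none none (-1)).getD "").toList (PySem.Str.len word))
                  (PyTrie.mk [] false PyChildren.nil) words)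
                ((PySem.Str.slice? q none none (-1)).getD "").toList (PySem.Str.len q)
        else
          pySearch
            (List.foldl (fun t word => pyAdd t word.toList (PySem.Str.len word)) (PyTrie.mk [] false PyChildren.nil)
              words)
            q.toList (PySem.Str.len q)) =
      if PySem.Str.isIn "?" q = false then (0 : Int)
      else
        if PySem.Str.pyGet? q 0 = some '?' then
          if PySem.Str.pyGet? q (-1) = some '?' then
            (List.foldl (fun d w => d.insert (PySem.Str.len w) (d.getD (PySem.Str.len w) 0 + 1)) PySem.Dict.empty
                  words).getD
              (PySem.Str.len q) 0
          else
            (List.foldl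
                  (fun d w =>
                    List.foldl
                      (fun d i =>
                        d.insert
                          (PySem.Str.slice ((PySem.Str.slice? w none none (-1)).getD "") none (some i), PySem.Str.len w)
                          (d.getD
                              (PySem.Str.slice ((PySem.Str.slice? w none none (-1)).getD "") none (some i),
                                PySem.Str.len w)
                              0 +
                            1))
                      d (PySem.List.pyRange 1 (PySem.Str.len w + 1)))
                  PySem.Dict.empty words).getD
              (PySem.Str.slice ((PySem.Str.slice? q none none (-1)).getD "") none
                  (some (PySem.Str.find ((PySem.Str.slice? q none none (-1)).getD "") "?")),
                PySem.Str.len q)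
              0
        else
          (List.foldl
                (fun d w =>
                  List.foldl
                    (fun d i =>
                      d.insert (PySem.Str.slice w none (some i), PySem.Str.len w)
                        (d.getD (PySem.Str.slice w none (some i), PySem.Str.len w) 0 + 1))
                    d (PySem.List.pyRange 1 (PySem.Str.len w + 1)))
                PySem.Dict.empty words).getD
            (PySem.Str.slice q none (some (PySem.Str.find q "?")), PySem.Str.len q) 0 := by
  have hqm : "?".toList = ['?'] := rfl
  have hcs : q.toList ≠ [] := fun h => hq (String.toList_inj.mp (by simpa using h))
  obtain ⟨c0, rest, hsplit⟩ : ∃ c0 rest, q.toList = c0 :: rest := by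
    cases h : q.toList with
    | nil => exact absurd h hcs
    | cons a b => exact ⟨a, b, rfl⟩
  have hget0 : PySem.Str.pyGet? q 0 = some c0 := by
    rw [PySem.Str.pyGet?_eq, hsplit]; simp [pysem]
  obtain ⟨cl, hcl⟩ : ∃ cl, q.toList.getLast? = some cl := by
    cases h : q.toList.getLast? with
    | none => exact absurd (List.getLast?_eq_none_iff.mp h) hcs
    | some a => exact ⟨a, rfl⟩
  have hgetm1 : PySem.Str.pyGet? q (-1) = some cl := by
    rw [PySem.Str.pyGet?_eq]
    simp [pysem, hcl]
  rw [hget0, hgetm1]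
  simp only [Option.some.injEq]
  by_cases hc0 : c0 = '?'
  case neg =>
    rw [if_neg hc0, if_neg hc0, pySearch_eq]
    by_cases hmem : '?' ∈ q.toList
    case neg =>
      have hisin : PySem.Str.isIn "?" q = false := by
        rw [Bool.eq_false_iff]
        intro hT
        exact hmem ((List.singleton_infix_iff _ _).mp (hqm ▸ (PySem.Str.isIn_iff_infix _ _).mp hT))
      rw [if_neg hmem, if_pos hisin]
    case pos =>
      have hisin : PySem.Str.isIn "?" q = true := by
        rw [PySem.Str.isIn_iff_infix, hqm]
        exact (List.singleton_infix_iff _ _).mpr hmem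
      rw [if_pos hmem, if_neg (show ¬(PySem.Str.isIn "?" q = false) by rw [hisin]; simp)]
      -- A side
      have htwc : q.toList.takeWhile (· ≠ '?') = c0 :: rest.takeWhile (· ≠ '?') := by
        rw [hsplit, List.takeWhile_cons_of_pos (by simpa using hc0)]
      rw [htwc, getLens_foldl (fun w => w.toList) words _ c0 (rest.takeWhile (· ≠ '?'))]
      rw [show getLens (PyTrie.mk [] false PyChildren.nil) (c0 :: rest.takeWhile (· ≠ '?')) = [] from rfl]
      rw [List.nil_append, countA_eq words (fun w => w.toList)]
      -- B side
      rw [affixCnt_getD (fun w => w) (fun w => PySem.Str.len_eq w) words]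
      have hfind0 : 0 ≤ PySem.Str.find q "?" := by
        rw [PySem.Str.find_eq, hqm]
        exact (PySem.Chars.find_nonneg_iff _ _).mpr ((List.singleton_infix_iff _ _).mpr hmem)
      have hP0 : (PySem.Str.slice q none (some (PySem.Str.find q "?"))).toList =
          c0 :: rest.takeWhile (· ≠ '?') := by
        rw [toList_slice_to _ _ hfind0, PySem.Str.find_eq, hqm,
          ← takeWhile_eq_take_find _ hmem, htwc]
      rw [hP0]
      exact_mod_cast congrArg Nat.cast
        (countP_bridge words (fun w => w.toList) (c0 :: rest.takeWhile (· ≠ '?')) (PySem.Str.len q)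
          (by simp))
  case pos =>
    subst hc0
    have hmem : '?' ∈ q.toList := by rw [hsplit]; exact List.mem_cons_self ..
    have hisin : PySem.Str.isIn "?" q = true := by
      rw [PySem.Str.isIn_iff_infix, hqm]
      exact (List.singleton_infix_iff _ _).mpr hmem
    rw [if_pos rfl, if_pos rfl, if_neg (show ¬(PySem.Str.isIn "?" q = false) by rw [hisin]; simp)]
    by_cases hclq : cl = '?'
    case pos =>
      rw [if_pos hclq, if_pos hclq, byLen_getD, PySem.List.count_eq]
    case neg =>
      rw [if_neg hclq, if_neg hclq]
      simp only [PySem.Str.slice?_none_none_neg_one, Option.getD_some, String.toList_ofList]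
      rw [pySearch_eq]
      have hmemr : '?' ∈ q.toList.reverse := List.mem_reverse.mpr hmem
      rw [if_pos hmemr]
      obtain ⟨rtl, hrev⟩ : ∃ rtl, q.toList.reverse = cl :: rtl := by
        have hh : q.toList.reverse.head? = some cl := by rw [List.head?_reverse]; exact hcl
        cases h : q.toList.reverse with
        | nil => rw [h] at hh; exact absurd hh (by simp)
        | cons a b =>
            rw [h] at hh
            simp only [List.head?_cons, Option.some.injEq] at hh
            exact ⟨b, by rw [hh]⟩
      have htwc : q.toList.reverse.takeWhile (· ≠ '?') = cl :: rtl.takeWhile (· ≠ '?') := by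
        rw [hrev, List.takeWhile_cons_of_pos (by simpa using hclq)]
      rw [htwc, getLens_foldl (fun w => w.toList.reverse) words _ cl (rtl.takeWhile (· ≠ '?'))]
      rw [show getLens (PyTrie.mk [] false PyChildren.nil) (cl :: rtl.takeWhile (· ≠ '?')) = [] from rfl]
      rw [List.nil_append, countA_eq words (fun w => w.toList.reverse)]
      -- B side
      rw [affixCnt_getD (fun w => String.ofList w.toList.reverse)
        (fun w => by simp [pysem]) words]
      have hfind0 : 0 ≤ PySem.Str.find (String.ofList q.toList.reverse) "?" := by
        rw [PySem.Str.find_eq, hqm, String.toList_ofList]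
        exact (PySem.Chars.find_nonneg_iff _ _).mpr ((List.singleton_infix_iff _ _).mpr hmemr)
      have hP0 : (PySem.Str.slice (String.ofList q.toList.reverse) none
          (some (PySem.Str.find (String.ofList q.toList.reverse) "?"))).toList =
          cl :: rtl.takeWhile (· ≠ '?') := by
        rw [toList_slice_to _ _ hfind0, PySem.Str.find_eq, hqm, String.toList_ofList,
          ← takeWhile_eq_take_find _ hmemr, htwc]
      rw [hP0]
      simp only [String.toList_ofList]
      exact_mod_cast congrArg Nat.cast
        (countP_bridge words (fun w => w.toList.reverse) (cl :: rtl.takeWhile (· ≠ '?'))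
          (PySem.Str.len q) (by simp))

-- ===== VERDICT (by name: the statement is the Claim_ definition above) =====
theorem solution_spec : Claim_equal_solution := by
  unfold Claim_equal_solution
  intro words queries hdom hpre
  unfold Spec_solution solution solution_alt
  simp only []
  rw [show (List.foldl
        (fun (st : PyTrie × PyTrie × List Int) word =>
          (pyAdd st.1 word.toList (PySem.Str.len word),
           pyAdd st.2.1 ((PySem.Str.slice? word none none (-1)).getD "").toList (PySem.Str.len word),
           st.2.2 ++ [PySem.Str.len word]))
        (PyTrie.mk [] false PyChildren.nil, PyTrie.mk [] false PyChildren.nil, []) words)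
      = (words.foldl (fun t word => pyAdd t word.toList (PySem.Str.len word)) (PyTrie.mk [] false PyChildren.nil),
         words.foldl (fun t word => pyAdd t ((PySem.Str.slice? word none none (-1)).getD "").toList (PySem.Str.len word)) (PyTrie.mk [] false PyChildren.nil),
         words.foldl (fun acc word => acc ++ [PySem.Str.len word]) [])
    from foldl_prod3
      (fun t word => pyAdd t word.toList (PySem.Str.len word))
      (fun t word => pyAdd t ((PySem.Str.slice? word none none (-1)).getD "").toList (PySem.Str.len word))
      (fun acc word => acc ++ [PySem.Str.len word]) words _ _ _]
  rw [foldl_body_append _ (fun w => PySem.Str.len w) (fun acc x => rfl) words []]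
  rw [foldl_body_append _ _ (fun acc q => rfl) queries []]
  rw [foldl_body_append _ (fun q =>
    if PySem.Str.isIn "?" q = false then (0 : Int)
    else
      if PySem.Str.pyGet? q 0 = some '?' then
        if PySem.Str.pyGet? q (-1) = some '?' then
          (words.foldl (fun d w =>
            d.insert (PySem.Str.len w) (d.getD (PySem.Str.len w) 0 + 1)) PySem.Dict.empty).getD (PySem.Str.len q) 0
        else
          (words.foldl (fun d w =>
            (PySem.List.pyRange 1 (PySem.Str.len w + 1) 1).foldl (fun d i =>
              d.insert (PySem.Str.slice ((PySem.Str.slice? w none none (-1)).getD "") none (some i), PySem.Str.len w)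
                (d.getD (PySem.Str.slice ((PySem.Str.slice? w none none (-1)).getD "") none (some i), PySem.Str.len w) 0 + 1)) d)
            PySem.Dict.empty).getD
            (PySem.Str.slice ((PySem.Str.slice? q none none (-1)).getD "") none
              (some (PySem.Str.find ((PySem.Str.slice? q none none (-1)).getD "") "?")), PySem.Str.len q) 0
      else
        (words.foldl (fun d w =>
          (PySem.List.pyRange 1 (PySem.Str.len w + 1) 1).foldl (fun d i =>
            d.insert (PySem.Str.slice w none (some i), PySem.Str.len w)
              (d.getD (PySem.Str.slice w none (some i), PySem.Str.len w) 0 + 1)) d)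
          PySem.Dict.empty).getD
          (PySem.Str.slice q none (some (PySem.Str.find q "?")), PySem.Str.len q) 0)
    (fun acc q => by simp only []; split_ifs <;> rfl) queries []]
  simp only [List.nil_append]
  apply List.map_congr_left
  intro q hqmem
  exact perQuery words q (fun h => hpre (h ▸ hqmem))
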